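-- pv_equiv track=rewrite | github.com/sergeio/riddle-blog | generate_tex_sums.py | reduce_fraction_sum
-- ===== SOURCE A (Python) =====
-- def reduce_fraction_sum(fraction_list):
--     """If the fraction list has identical fractions, sum them."""
--     if len(fraction_list) == 1:
--         return fraction_list
--     fraction_list = sorted(fraction_list, reverse=True)
--     result = []
--     for i in range(len(fraction_list)- 1):
--         this = fraction_list[i]
--         next_ = fraction_list[i + 1]
--         if this == next_:
--             to_reduce = fraction_list[:i] + [this * 2] + fraction_list[i + 2:]
--             return reduce_fraction_sum(to_reduce)
--     return fraction_list
-- ===== SOURCE B (Python) =====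
-- def reduce_fraction_sum(fraction_list):
--     """If the fraction list has identical fractions, sum them."""
--     has_zero = 0 in fraction_list
--     weights = {}
--     for x in fraction_list:
--         if x != 0:
--             m, k = x, 0
--             while m % 2 == 0:
--                 m //= 2
--                 k += 1
--             weights[m] = weights.get(m, 0) + (1 << k)
--     out = [0] if has_zero else []
--     for m, w in weights.items():
--         j = 0
--         while w:
--             if w & 1:
--                 out.append(m << j)
--             w >>= 1
--             j += 1
--     return sorted(out, reverse=True)
-- ===== Notes on version B (the rewrite author's own statement) =====
-- stated objective: faster
-- what changed: A repeatedly re-sorts the whole list and scans it for the first adjacent equal pair, merging one pair per recursive call; B makes a single pass accumulating, per odd kernel m (x = m*2^k), the total weight sum of 2^k in a dict, then emits m*2^j for each binary digit j of that weight (binary carry propagation) plus a single 0 if any zero occurs, and sorts the distinct results descending once.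
import Mathlib
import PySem

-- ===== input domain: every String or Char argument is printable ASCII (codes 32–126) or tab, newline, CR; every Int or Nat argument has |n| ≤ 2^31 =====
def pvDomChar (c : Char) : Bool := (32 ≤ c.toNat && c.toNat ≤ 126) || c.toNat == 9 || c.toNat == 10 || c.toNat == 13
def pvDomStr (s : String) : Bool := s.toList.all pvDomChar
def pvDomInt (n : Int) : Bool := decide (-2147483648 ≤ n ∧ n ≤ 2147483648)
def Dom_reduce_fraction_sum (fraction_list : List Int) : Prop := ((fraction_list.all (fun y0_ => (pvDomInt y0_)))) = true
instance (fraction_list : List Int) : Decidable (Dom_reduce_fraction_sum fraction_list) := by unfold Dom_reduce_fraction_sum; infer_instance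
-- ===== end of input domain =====

-- B replaces A's repeated sort-scan-merge recursion by one counting pass with binary
-- carry propagation per odd kernel, emitting the distinct merged values once, sorted descending.

-- ===== PORT A =====
-- the 'for i in range(len(fraction_list)-1)' scan comparing fraction_list[i] with fraction_list[i+1]:
-- returns the first index i (with the common value) where two adjacent entries are equal
def findPairAux : List Int → Option (Nat × Int)
  | x :: y :: t => if x = y then some (0, x) else (findPairAux (y :: t)).map (fun p => (p.1 + 1, p.2))
  | _ => none

theorem findPairAux_some_decomp (s : List Int) (i : Nat) (c : Int)
    (h : findPairAux s = some (i, c)) : ∃ pre suf, s = pre ++ c :: c :: suf ∧ pre.length = i := by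
  induction s generalizing i c with
  | nil => simp [findPairAux] at h
  | cons x t ih =>
    cases t with
    | nil => simp [findPairAux] at h
    | cons y u =>
      by_cases hxy : x = y
      · simp [findPairAux, hxy] at h
        exact ⟨[], u, by simp [hxy, ← h.2], by simp [← h.1]⟩
      · simp [findPairAux, hxy] at h
        obtain ⟨j, hj, he⟩ := h
        obtain ⟨pre, suf, hs, hl⟩ := ih j c hj
        exact ⟨x :: pre, suf, by simp [hs], by simp [hl, ← he]⟩

theorem findPairAux_some_le (s : List Int) (i : Nat) (c : Int)
    (h : findPairAux s = some (i, c)) : i + 2 ≤ s.length := by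
  obtain ⟨pre, suf, hs, hl⟩ := findPairAux_some_decomp s i c h
  subst hs; simp; omega

def reduce_fraction_sum (fraction_list : List Int) : List Int :=
  if fraction_list.length = 1 then fraction_list
  else
    let s := PySem.List.sorted fraction_list (fun x => x) true
    match hfp : findPairAux s with
    | some (i, c) =>
        reduce_fraction_sum
          (PySem.List.slice s none (some (i : Int)) ++ [c * 2] ++
            PySem.List.slice s (some ((i : Int) + 2)) none)
    | none => s
termination_by fraction_list.length
decreasing_by
  have hle := findPairAux_some_le _ _ _ hfp
  rw [PySem.List.length_sorted] at hle
  rw [show ((i : Int) + 2) = (((i + 2 : Nat) : Int)) by push_cast; ring]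
  rw [PySem.List.slice_to_natCast, PySem.List.slice_from_natCast]
  simp [PySem.List.length_sorted]
  omega

-- ===== PORT B =====
theorem floordiv_two_lt (m : Int) (h0 : m ≠ 0) (h2 : PySem.Int.mod m 2 = 0) :
    (PySem.Int.floordiv m 2).natAbs < m.natAbs := by
  obtain ⟨q, hq⟩ := (PySem.Int.mod_eq_zero_iff_dvd m 2).1 h2
  rw [PySem.Int.floordiv_eq_ediv_of_pos (by norm_num), hq, Int.mul_ediv_cancel_left _ (by norm_num)]
  have : q ≠ 0 := by rintro rfl; simp at hq; exact h0 hq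
  simp [hq, Int.natAbs_mul]; omega

-- the 'while m % 2 == 0: m //= 2; k += 1' loop (call sites guarantee m ≠ 0;
-- the m ≠ 0 conjunct only totalizes the recursion, Python's loop never sees m = 0)
def oddLoop (m : Int) (k : Nat) : Int × Nat :=
  if h : m ≠ 0 ∧ PySem.Int.mod m 2 = 0 then oddLoop (PySem.Int.floordiv m 2) (k + 1) else (m, k)
termination_by m.natAbs
decreasing_by exact floordiv_two_lt m h.1 h.2

-- the 'while w: if w & 1: out.append(m << j); w >>= 1; j += 1' loop (w is a sum of powers of two,
-- hence positive when nonzero; '0 < w' totalizes what Python states as 'w != 0')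
def bitsLoop (out : List Int) (m w : Int) (j : Nat) : List Int :=
  if h : 0 < w then
    bitsLoop (if PySem.Int.band w 1 = 1 then out ++ [m <<< j] else out) m (w >>> (1 : Nat)) (j + 1)
  else out
termination_by w.toNat
decreasing_by
  rw [Int.shiftRight_eq_div_pow]
  omega

def reduce_fraction_sum_alt (fraction_list : List Int) : List Int :=
  let has_zero := fraction_list.contains 0
  let weights := fraction_list.foldl
    (fun (d : PySem.Dict Int Int) x =>
      if x ≠ 0 then
        let mk := oddLoop x 0
        d.insert mk.1 (d.getD mk.1 0 + ((1 : Int) <<< mk.2))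
      else d)
    PySem.Dict.empty
  let out0 : List Int := if has_zero then [0] else []
  let out := weights.items.foldl (fun acc p => bitsLoop acc p.1 p.2 0) out0
  PySem.List.sorted out (fun x => x) true

-- ===== PRECONDITION & SPEC =====
def Spec_reduce_fraction_sum (fraction_list : List Int) (out : List Int) : Prop := out = reduce_fraction_sum_alt fraction_list
instance (fraction_list : List Int) (out : List Int) : Decidable (Spec_reduce_fraction_sum fraction_list out) := by unfold Spec_reduce_fraction_sum; infer_instance

-- ===== CLAIM (what is proved, stated in full; the proofs are below) =====
def Claim_equal_reduce_fraction_sum : Prop := ∀ (fraction_list : List Int), Dom_reduce_fraction_sum fraction_list → Spec_reduce_fraction_sum fraction_list (reduce_fraction_sum fraction_list)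

-- ===== LEMMAS AND PROOFS =====

/-- the odd kernel of x : the odd m with x = m * 2 ^ pvLev x (for x ≠ 0) -/
def pvKey (x : Int) : Int := (oddLoop x 0).1
def pvLev (x : Int) : Nat := (oddLoop x 0).2

/-- binary indices of n, least significant first -/
def pvBits (n : Nat) : List Nat :=
  if h : n = 0 then [] else (if n % 2 = 1 then [0] else []) ++ (pvBits (n / 2)).map (· + 1)
termination_by n
decreasing_by exact Nat.div_lt_self (Nat.pos_of_ne_zero h) one_lt_two

def pvNonzeros (l : List Int) : List Int := l.filter (fun x => !(x == 0))

/-- total multiplicity weight of odd kernel m in l -/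
def pvW (l : List Int) (m : Int) : Int :=
  (((pvNonzeros l).filter (fun x => pvKey x == m)).map (fun x => (1 : Int) <<< pvLev x)).sum

def pvWeights (l : List Int) : PySem.Dict Int Int :=
  l.foldl
    (fun (d : PySem.Dict Int Int) x =>
      if x ≠ 0 then
        let mk := oddLoop x 0
        d.insert mk.1 (d.getD mk.1 0 + ((1 : Int) <<< mk.2))
      else d)
    PySem.Dict.empty

def pvExp (m w : Int) : List Int := (pvBits w.toNat).map (fun i : Nat => m <<< i)

-- ---- oddLoop facts ----
theorem oddLoop_acc (x : Int) (k : Nat) : oddLoop x k = (pvKey x, pvLev x + k) := by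
  by_cases h : x ≠ 0 ∧ PySem.Int.mod x 2 = 0
  · have h1 : oddLoop x k = oddLoop (PySem.Int.floordiv x 2) (k + 1) := by rw [oddLoop, dif_pos h]
    have h2 : oddLoop x 0 = oddLoop (PySem.Int.floordiv x 2) 1 := by rw [oddLoop, dif_pos h]
    rw [h1, oddLoop_acc (PySem.Int.floordiv x 2) (k + 1)]
    simp only [pvKey, pvLev, h2, oddLoop_acc (PySem.Int.floordiv x 2) 1]
    simp; omega
  · have h1 : oddLoop x k = (x, k) := by rw [oddLoop, dif_neg h]
    have h2 : oddLoop x 0 = (x, 0) := by rw [oddLoop, dif_neg h]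
    simp [pvKey, pvLev, h1, h2]
termination_by x.natAbs
decreasing_by all_goals exact floordiv_two_lt x h.1 h.2

theorem oddLoop_spec (x : Int) (hx : x ≠ 0) :
    pvKey x ≠ 0 ∧ PySem.Int.mod (pvKey x) 2 = 1 ∧ x = pvKey x * 2 ^ pvLev x := by
  by_cases h2 : PySem.Int.mod x 2 = 0
  · have h : x ≠ 0 ∧ PySem.Int.mod x 2 = 0 := ⟨hx, h2⟩
    obtain ⟨q, hq⟩ := (PySem.Int.mod_eq_zero_iff_dvd x 2).1 h2
    have hfd : PySem.Int.floordiv x 2 = q := by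
      rw [PySem.Int.floordiv_eq_ediv_of_pos (by norm_num), hq,
        Int.mul_ediv_cancel_left _ (by norm_num)]
    have hq0 : q ≠ 0 := by rintro rfl; simp at hq; exact hx hq
    have hunf : oddLoop x 0 = oddLoop (PySem.Int.floordiv x 2) 1 := by rw [oddLoop, dif_pos h]
    have hkey : pvKey x = pvKey q ∧ pvLev x = pvLev q + 1 := by
      unfold pvKey pvLev
      rw [hunf, hfd, oddLoop_acc q 1]
      exact ⟨rfl, rfl⟩
    obtain ⟨ih1, ih2, ih3⟩ := oddLoop_spec q hq0
    refine ⟨by rw [hkey.1]; exact ih1, by rw [hkey.1]; exact ih2, ?_⟩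
    rw [hkey.1, hkey.2, pow_succ, hq]
    calc 2 * q = 2 * (pvKey q * 2 ^ pvLev q) := by rw [← ih3]
      _ = pvKey q * (2 ^ pvLev q * 2) := by ring
  · have h1 : oddLoop x 0 = (x, 0) := by rw [oddLoop, dif_neg (fun hc => h2 hc.2)]
    have hk : pvKey x = x := by simp [pvKey, h1]
    have hl : pvLev x = 0 := by simp [pvLev, h1]
    have hge := PySem.Int.mod_nonneg (a := x) (b := 2) (by norm_num)
    have hlt := PySem.Int.mod_lt (a := x) (b := 2) (by norm_num)
    exact ⟨by rw [hk]; exact hx, by rw [hk]; omega, by rw [hk, hl]; ring⟩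
termination_by x.natAbs
decreasing_by rw [← hfd]; exact floordiv_two_lt x h.1 h.2

theorem key_double (x : Int) (hx : x ≠ 0) :
    pvKey (x * 2) = pvKey x ∧ pvLev (x * 2) = pvLev x + 1 := by
  have h : x * 2 ≠ 0 ∧ PySem.Int.mod (x * 2) 2 = 0 := by
    refine ⟨by simp [hx], (PySem.Int.mod_eq_zero_iff_dvd _ 2).2 ⟨x, by ring⟩⟩
  have hfd : PySem.Int.floordiv (x * 2) 2 = x := by
    rw [PySem.Int.floordiv_eq_ediv_of_pos (by norm_num), Int.mul_ediv_cancel _ (by norm_num)]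
  have hunf : oddLoop (x * 2) 0 = oddLoop x 1 := by rw [oddLoop, dif_pos h, hfd]
  constructor <;> simp [pvKey, pvLev, hunf, oddLoop_acc x 1]

/-- uniqueness of the odd · 2^k decomposition -/
theorem odd_decomp_inj (m m' : Int) (i j : Nat)
    (hm : PySem.Int.mod m 2 = 1) (hm' : PySem.Int.mod m' 2 = 1)
    (h : m * 2 ^ i = m' * 2 ^ j) : m = m' ∧ i = j := by
  rw [PySem.Int.mod_eq_emod_of_pos (by norm_num)] at hm hm'
  induction i generalizing j with
  | zero =>
    cases j with
    | zero => simpa using h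
    | succ jj =>
      exfalso
      have hh : m = m' * 2 ^ (jj + 1) := by simpa using h
      have hdvd : (2 : Int) ∣ m := ⟨m' * 2 ^ jj, by rw [hh, pow_succ]; ring⟩
      omega
  | succ ii ih =>
    cases j with
    | zero =>
      exfalso
      have hh : m' = m * 2 ^ (ii + 1) := by simpa using h.symm
      have hdvd : (2 : Int) ∣ m' := ⟨m * 2 ^ ii, by rw [hh, pow_succ]; ring⟩
      omega
    | succ jj =>
      have h2 : (2 : Int) * (m * 2 ^ ii) = 2 * (m' * 2 ^ jj) := by
        rw [pow_succ, pow_succ] at h; linarith [h]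
      have := ih jj (mul_left_cancel₀ (by norm_num) h2)
      exact ⟨this.1, by omega⟩

-- ---- pvBits facts ----
theorem pvBits_nodup (n : Nat) : (pvBits n).Nodup := by
  by_cases h : n = 0
  · simp [pvBits, h]
  · rw [pvBits]
    simp only [h]
    have ih := pvBits_nodup (n / 2)
    have hmap : ((pvBits (n / 2)).map (· + 1)).Nodup :=
      ih.map_on (fun x _ y _ hxy => by omega)
    have hz : (0 : Nat) ∉ (pvBits (n / 2)).map (· + 1) := by simp
    by_cases hp : n % 2 = 1 <;> simp [hp, hmap, hz]
termination_by n
decreasing_by exact Nat.div_lt_self (Nat.pos_of_ne_zero h) one_lt_two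

theorem filter_beq_of_nodup {α : Type} [BEq α] [LawfulBEq α] (a : α) (l : List α) (h : l.Nodup) :
    l.filter (fun x => x == a) = if a ∈ l then [a] else [] := by
  induction l with
  | nil => simp
  | cons b t ih =>
    obtain ⟨hb, ht⟩ := List.nodup_cons.1 h
    by_cases hba : b = a
    · subst hba
      have : t.filter (fun x => x == b) = [] :=
        List.filter_eq_nil_iff.2 (fun x hx => by simp; rintro rfl; exact hb hx)
      simp [List.filter_cons, this]
    · have hmem : (a ∈ b :: t) ↔ a ∈ t := by
        simp only [List.mem_cons]
        constructor
        · rintro (h | h)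
          · exact absurd h.symm hba
          · exact h
        · exact Or.inr
      rw [List.filter_cons, if_neg (by simp [hba]), ih ht]
      by_cases hat : a ∈ t <;> simp [hat, hmem]

theorem sum_pow_split (ks : List Nat) (hnd : ks.Nodup) :
    (ks.map (fun k => 2 ^ k)).sum
      = (if 0 ∈ ks then 1 else 0)
        + 2 * (((ks.filter (fun k => !(k == 0))).map (fun k => 2 ^ (k - 1))).sum) := by
  induction ks with
  | nil => simp
  | cons k t ih =>
    obtain ⟨hk0, ht⟩ := List.nodup_cons.1 hnd
    by_cases hk : k = 0
    · subst hk
      have h0t : (0 : Nat) ∉ t := hk0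
      simp [List.filter_cons, ih ht, h0t]
    · have hkpow : 2 ^ k = 2 * 2 ^ (k - 1) := by
        conv_lhs => rw [show k = (k - 1) + 1 by omega]
        rw [pow_succ]; ring
      have hmem : ((0 : Nat) ∈ k :: t) ↔ (0 ∈ t) := by
        simp only [List.mem_cons]
        constructor
        · rintro (h | h)
          · exact absurd h.symm hk
          · exact h
        · exact Or.inr
      simp only [List.map_cons, List.sum_cons, List.filter_cons,
        show (!(k == 0)) = true by simp [hk], if_true, ih ht]
      by_cases hzt : (0 : Nat) ∈ t <;> simp [hzt, hmem] <;> omega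

theorem eq_nil_of_sum_pow_zero (ks : List Nat) (h : (ks.map (fun k => 2 ^ k)).sum = 0) :
    ks = [] := by
  cases ks with
  | nil => rfl
  | cons k t =>
    exfalso
    simp only [List.map_cons, List.sum_cons] at h
    have := Nat.two_pow_pos k
    omega

theorem pvBits_sum_perm (n : Nat) (ks : List Nat) (hnd : ks.Nodup)
    (hs : (ks.map (fun k => 2 ^ k)).sum = n) : (pvBits n).Perm ks := by
  by_cases h0 : n = 0
  · subst h0
    rw [eq_nil_of_sum_pow_zero ks hs]
    simp [pvBits]
  · have hsplit := sum_pow_split ks hnd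
    rw [hs] at hsplit
    have hnd1 : (ks.filter (fun k => !(k == 0))).Nodup := hnd.filter _
    have hnd' : ((ks.filter (fun k => !(k == 0))).map (fun k => k - 1)).Nodup := by
      refine hnd1.map_on (fun x hx y hy hxy => ?_)
      have hx0 : x ≠ 0 := by simpa using (List.mem_filter.1 hx).2
      have hy0 : y ≠ 0 := by simpa using (List.mem_filter.1 hy).2
      omega
    have hsum' : (((ks.filter (fun k => !(k == 0))).map (fun k => k - 1)).map
        (fun k => 2 ^ k)).sum = n / 2 := by
      rw [List.map_map]
      have : ((fun k => 2 ^ k) ∘ fun k => k - 1) = fun k => 2 ^ (k - 1) := rfl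
      rw [this]
      by_cases hz : 0 ∈ ks
      · rw [if_pos hz] at hsplit; omega
      · rw [if_neg hz] at hsplit; omega
    have hrec := pvBits_sum_perm (n / 2) _ hnd' hsum'
    have hmap : ((pvBits (n / 2)).map (· + 1)).Perm
        ((((ks.filter (fun k => !(k == 0))).map (fun k => k - 1))).map (· + 1)) := hrec.map _
    have hks1 : (((ks.filter (fun k => !(k == 0))).map (fun k => k - 1))).map (· + 1)
        = ks.filter (fun k => !(k == 0)) := by
      rw [List.map_map]
      have : ∀ x ∈ ks.filter (fun k => !(k == 0)), ((· + 1) ∘ fun k => k - 1) x = id x := by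
        intro x hx
        have : x ≠ 0 := by simpa using (List.mem_filter.1 hx).2
        simp [Function.comp]; omega
      rw [List.map_congr_left this, List.map_id]
    have hz : (n % 2 = 1) ↔ 0 ∈ ks := by
      by_cases hzk : 0 ∈ ks
      · rw [if_pos hzk] at hsplit; simp [hzk]; omega
      · rw [if_neg hzk] at hsplit; simp [hzk]; omega
    have hzeq : (if n % 2 = 1 then ([0] : List Nat) else []) = ks.filter (fun k => k == 0) := by
      rw [filter_beq_of_nodup 0 ks hnd]
      by_cases hzk : 0 ∈ ks
      · rw [if_pos hzk, if_pos (hz.2 hzk)]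
      · rw [if_neg hzk, if_neg (fun hp => hzk (hz.1 hp))]
    rw [pvBits, dif_neg h0]
    have step1 : ((if n % 2 = 1 then ([0] : List Nat) else []) ++ (pvBits (n / 2)).map (· + 1)).Perm
        ((if n % 2 = 1 then ([0] : List Nat) else []) ++ ks.filter (fun k => !(k == 0))) :=
      List.Perm.append_left _ (hks1 ▸ hmap)
    refine step1.trans ?_
    rw [hzeq]
    exact List.filter_append_perm _ ks
termination_by n
decreasing_by exact Nat.div_lt_self (Nat.pos_of_ne_zero h0) one_lt_two

-- ---- bitsLoop characterization ----
theorem bitsLoop_eq (w : Int) (out : List Int) (m : Int) (j : Nat) :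
    bitsLoop out m w j = out ++ (pvBits w.toNat).map (fun i => m <<< (j + i)) := by
  by_cases h : 0 < w
  · rw [bitsLoop, dif_pos h]
    have hsr : w >>> (1 : Nat) = w / 2 := by
      rw [Int.shiftRight_eq_div_pow]; norm_num
    have hlt : (w >>> (1 : Nat)).toNat < w.toNat := by rw [hsr]; omega
    rw [bitsLoop_eq (w >>> (1 : Nat))]
    have hband : PySem.Int.band w 1 = w % 2 := by
      rw [PySem.Int.band_one, PySem.Int.mod_eq_emod_of_pos (by norm_num)]
    have htn : (w >>> (1 : Nat)).toNat = w.toNat / 2 := by rw [hsr]; omega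
    have hn0 : w.toNat ≠ 0 := by omega
    have hpar : (PySem.Int.band w 1 = 1) ↔ (w.toNat % 2 = 1) := by rw [hband]; omega
    have hmapsh : (fun i => m <<< (j + 1 + i)) = (fun i : Nat => m <<< (j + (i + 1))) := by
      funext i; congr 1; omega
    conv_rhs => rw [pvBits, dif_neg hn0]
    rw [htn, hmapsh]
    by_cases hp : w.toNat % 2 = 1
    · rw [if_pos (hpar.2 hp), if_pos hp]
      simp [List.map_map, Function.comp]
    · rw [if_neg (fun hc => hp (hpar.1 hc)), if_neg hp]
      simp [List.map_map, Function.comp]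
  · rw [bitsLoop, dif_neg h]
    have : w.toNat = 0 := by omega
    simp [this, pvBits]
termination_by w.toNat

theorem bitsLoop_zero (out : List Int) (m w : Int) :
    bitsLoop out m w 0 = out ++ pvExp m w := by
  rw [bitsLoop_eq, pvExp]
  congr 1
  apply List.map_congr_left
  intro i _
  simp

-- ---- dict fold characterization ----
theorem weights_eq_filter (l : List Int) :
    pvWeights l = (pvNonzeros l).foldl
      (fun d x => d.insert (pvKey x) (d.getD (pvKey x) 0 + ((1 : Int) <<< pvLev x)))
      PySem.Dict.empty := by
  unfold pvWeights pvNonzeros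
  change List.foldl (fun (d : PySem.Dict Int Int) x =>
      if x ≠ 0 then d.insert (pvKey x) (d.getD (pvKey x) 0 + ((1 : Int) <<< pvLev x)) else d)
    PySem.Dict.empty l = _
  rw [PySem.List.foldl_ite_eq_foldl_filter (p := fun x : Int => x ≠ 0)
    (f := fun (d : PySem.Dict Int Int) x =>
      d.insert (pvKey x) (d.getD (pvKey x) 0 + ((1 : Int) <<< pvLev x)))]
  congr 1
  apply List.filter_congr
  intro x _
  rw [Bool.eq_iff_iff]
  simp

theorem weights_keys (l : List Int) :
    (pvWeights l).keys = PySem.Set.ofList ((pvNonzeros l).map pvKey) := by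
  rw [weights_eq_filter, PySem.Dict.keys_foldl_insert_key]
  rw [show PySem.Dict.empty.keys = ([] : List Int) from rfl]
  rfl

theorem weights_keys_nodup (l : List Int) : (pvWeights l).keys.Nodup := by
  rw [weights_eq_filter]
  exact PySem.Dict.nodup_keys_foldl_insert_key _ _ _ _ PySem.Dict.nodup_keys_empty

theorem getD_foldl_insert_add (l : List Int) (key g : Int → Int) (d : PySem.Dict Int Int) (m : Int) :
    (l.foldl (fun d x => d.insert (key x) (d.getD (key x) 0 + g x)) d).getD m 0
      = d.getD m 0 + ((l.filter (fun x => key x == m)).map g).sum := by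
  induction l generalizing d with
  | nil => simp
  | cons x t ih =>
    rw [List.foldl_cons, ih, PySem.Dict.getD_insert, List.filter_cons]
    by_cases hx : key x = m
    · rw [if_pos hx.symm, if_pos (by simp [hx])]
      simp [hx]
      ring
    · rw [if_neg (fun hc => hx hc.symm), if_neg (by simp [hx])]

theorem weights_getD (l : List Int) (m : Int) : (pvWeights l).getD m 0 = pvW l m := by
  rw [weights_eq_filter, getD_foldl_insert_add]
  simp [pvW]

theorem sum_shift_nonneg (xs : List Int) : 0 ≤ (xs.map (fun x => (1 : Int) <<< pvLev x)).sum := by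
  induction xs with
  | nil => simp
  | cons x t ih =>
    have hx : (0 : Int) ≤ (1 : Int) <<< pvLev x := by
      rw [Int.shiftLeft_eq]; positivity
    simp only [List.map_cons, List.sum_cons]
    linarith

theorem sum_shift_pos (xs : List Int) (h : xs ≠ []) :
    0 < (xs.map (fun x => (1 : Int) <<< pvLev x)).sum := by
  cases xs with
  | nil => exact absurd rfl h
  | cons x t =>
    have hx : (0 : Int) < (1 : Int) <<< pvLev x := by
      rw [Int.shiftLeft_eq]; positivity
    have ht := sum_shift_nonneg t
    simp only [List.map_cons, List.sum_cons]
    linarith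

theorem pvW_pos_of_mem (l : List Int) (m : Int) :
    m ∈ (pvWeights l).keys ↔ pvW l m ≠ 0 := by
  rw [weights_keys, PySem.Set.mem_ofList, List.mem_map]
  unfold pvW
  constructor
  · rintro ⟨x, hx, rfl⟩
    have hxf : x ∈ (pvNonzeros l).filter (fun y => pvKey y == pvKey x) :=
      List.mem_filter.2 ⟨hx, by simp⟩
    have hpos := sum_shift_pos _ (List.ne_nil_of_mem hxf)
    omega
  · intro hne
    rcases hfl : (pvNonzeros l).filter (fun x => pvKey x == m) with _ | ⟨x, t⟩
    · rw [hfl] at hne; simp at hne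
    · have hx := List.mem_filter.1 (hfl ▸ List.mem_cons_self (l := t))
      exact ⟨x, hx.1, by simpa using hx.2⟩

theorem mem_keys_facts (l : List Int) (m : Int) (h : m ∈ (pvWeights l).keys) :
    m ≠ 0 ∧ PySem.Int.mod m 2 = 1 := by
  rw [weights_keys, PySem.Set.mem_ofList, List.mem_map] at h
  obtain ⟨x, hx, rfl⟩ := h
  have hx0 : x ≠ 0 := by simpa using (List.mem_filter.1 hx).2
  obtain ⟨h1, h2, _⟩ := oddLoop_spec x hx0
  exact ⟨h1, h2⟩

theorem weights_items (l : List Int) :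
    (pvWeights l).items = (pvWeights l).keys.map (fun m => (m, pvW l m)) := by
  rw [PySem.Dict.items_eq_map_keys _ (weights_keys_nodup l) 0]
  exact List.map_congr_left (fun m _ => by rw [weights_getD])

-- ---- global shape of B ----
theorem alt_eq (l : List Int) :
    reduce_fraction_sum_alt l =
      PySem.List.sorted
        ((if 0 ∈ l then [0] else []) ++ (pvWeights l).keys.flatMap (fun m => pvExp m (pvW l m)))
        (fun x => x) true := by
  unfold reduce_fraction_sum_alt
  change PySem.List.sorted ((pvWeights l).items.foldl (fun acc p => bitsLoop acc p.1 p.2 0)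
    (if l.contains 0 then [0] else [])) (fun x => x) true = _
  rw [PySem.List.foldl_congr_mem _ _ (fun acc (p : Int × Int) => acc ++ pvExp p.1 p.2) _
    (fun acc p _ => bitsLoop_zero acc p.1 p.2)]
  rw [PySem.List.foldl_append_eq_flatMap]
  have hc : (if l.contains 0 then ([0] : List Int) else []) = (if 0 ∈ l then [0] else []) := by
    by_cases h : 0 ∈ l
    · rw [if_pos (List.contains_iff_mem.2 h), if_pos h]
    · rw [if_neg (fun hh => h (List.contains_iff_mem.1 hh)), if_neg h]
  rw [hc, weights_items, List.flatMap_map]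

theorem shiftLeft_inj (m : Int) (hm : m ≠ 0) (i j : Nat) (h : m <<< i = m <<< j) : i = j := by
  rw [Int.shiftLeft_eq, Int.shiftLeft_eq] at h
  have h2 : (2 : Int) ^ i = 2 ^ j := mul_left_cancel₀ hm h
  have h3 : ((2 ^ i : Nat) : Int) = ((2 ^ j : Nat) : Int) := by push_cast; exact h2
  exact Nat.pow_right_injective (le_refl 2) (by exact_mod_cast h3)

theorem shiftLeft_ne_zero (m : Int) (hm : m ≠ 0) (i : Nat) : m <<< i ≠ 0 := by
  rw [Int.shiftLeft_eq]
  exact mul_ne_zero hm (pow_ne_zero _ (by norm_num))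

theorem out_nodup (l : List Int) :
    ((if 0 ∈ l then [0] else []) ++ (pvWeights l).keys.flatMap (fun m => pvExp m (pvW l m))).Nodup := by
  rw [List.nodup_append]
  refine ⟨?_, ?_, ?_⟩
  · by_cases h : 0 ∈ l <;> simp [h]
  · rw [List.nodup_flatMap]
    constructor
    · intro m hm
      have hfac := mem_keys_facts l m hm
      exact (pvBits_nodup _).map_on (fun i _ j _ hij => shiftLeft_inj m hfac.1 i j hij)
    · refine (weights_keys_nodup l).imp_of_mem ?_
      intro a b ha hb hab
      intro z hz1 hz2
      simp only [pvExp, List.mem_map] at hz1 hz2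
      obtain ⟨i, _, hi⟩ := hz1
      obtain ⟨j, _, hj⟩ := hz2
      have hfa := mem_keys_facts l a ha
      have hfb := mem_keys_facts l b hb
      have heq : a * 2 ^ i = b * 2 ^ j := by
        rw [← Int.shiftLeft_eq, ← Int.shiftLeft_eq, hi, hj]
      exact hab (odd_decomp_inj a b i j hfa.2 hfb.2 heq).1
  · intro z hz1 w hz2 hzw
    by_cases h : 0 ∈ l
    · rw [if_pos h] at hz1
      simp at hz1
      subst hz1
      simp only [List.mem_flatMap, pvExp, List.mem_map] at hz2
      obtain ⟨m, hm, i, _, hi⟩ := hz2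
      exact shiftLeft_ne_zero m (mem_keys_facts l m hm).1 i (by rw [hi, ← hzw])
    · rw [if_neg h] at hz1
      simp at hz1

theorem sorted_rev_perm_eq (xs ys : List Int) (hp : xs.Perm ys) (hn : xs.Nodup) :
    PySem.List.sorted xs (fun x => x) true = PySem.List.sorted ys (fun x => x) true := by
  have hr := PySem.List.sorted_perm xs (fun x => x) true
  have hge := PySem.List.sorted_pairwise_rev xs (fun x => x)
  have hnd : (PySem.List.sorted xs (fun x => x) true).Nodup := hr.nodup_iff.2 hn
  have hgt : (PySem.List.sorted xs (fun x => x) true).Pairwise (fun a b => b < a) :=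
    (hge.and hnd).imp (fun h => lt_of_le_of_ne h.1 (Ne.symm h.2))
  exact (PySem.List.sorted_rev_eq_of_perm_of_pairwise_gt ys _ (fun x => x) (hr.trans hp) hgt).symm

/-- MASTER: B's result depends only on zero-membership and the weight function -/
theorem master (l₁ l₂ : List Int) (hz : (0 ∈ l₁) ↔ (0 ∈ l₂)) (hw : ∀ m, pvW l₁ m = pvW l₂ m) :
    reduce_fraction_sum_alt l₁ = reduce_fraction_sum_alt l₂ := by
  rw [alt_eq l₁, alt_eq l₂]
  have hks : (pvWeights l₁).keys.Perm ((pvWeights l₂).keys) :=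
    (List.perm_ext_iff_of_nodup (weights_keys_nodup l₁) (weights_keys_nodup l₂)).2
      (fun m => by rw [pvW_pos_of_mem, pvW_pos_of_mem, hw m])
  have hfx : (fun m => pvExp m (pvW l₁ m)) = (fun m => pvExp m (pvW l₂ m)) := by
    funext m; rw [hw m]
  have hflat : ((pvWeights l₁).keys.flatMap (fun m => pvExp m (pvW l₁ m))).Perm
      ((pvWeights l₂).keys.flatMap (fun m => pvExp m (pvW l₂ m))) := by
    rw [hfx]
    exact List.Perm.flatMap_right _ hks
  have hz' : (if 0 ∈ l₁ then ([0] : List Int) else []) = (if 0 ∈ l₂ then [0] else []) := by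
    by_cases h : 0 ∈ l₁
    · rw [if_pos h, if_pos (hz.1 h)]
    · rw [if_neg h, if_neg (fun hh => h (hz.2 hh))]
  apply sorted_rev_perm_eq
  · rw [hz']
    exact List.Perm.append_left _ hflat
  · exact out_nodup l₁

theorem pvW_perm (l₁ l₂ : List Int) (h : l₁.Perm l₂) (m : Int) : pvW l₁ m = pvW l₂ m := by
  unfold pvW pvNonzeros
  exact (((h.filter _).filter _).map _).sum_eq

theorem alt_perm (l₁ l₂ : List Int) (h : l₁.Perm l₂) :
    reduce_fraction_sum_alt l₁ = reduce_fraction_sum_alt l₂ :=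
  master l₁ l₂ h.mem_iff (pvW_perm l₁ l₂ h)

-- ---- the merge step preserves B ----
theorem pvW_merge (c : Int) (t : List Int) (m : Int) :
    pvW (c :: c :: t) m = pvW (c * 2 :: t) m := by
  by_cases hc : c = 0
  · subst hc
    simp [pvW, pvNonzeros, List.filter_cons]
  · have h2c : c * 2 ≠ 0 := mul_ne_zero hc (by norm_num)
    have hkd := key_double c hc
    unfold pvW pvNonzeros
    rw [List.filter_cons, List.filter_cons, List.filter_cons,
      if_pos (by simp [hc]), if_pos (by simp [hc]), if_pos (by simp [h2c])]
    by_cases hk : pvKey c = m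
    · rw [List.filter_cons, List.filter_cons, List.filter_cons,
        if_pos (by simp [hk]), if_pos (by simp [hk]), if_pos (by simp [hkd.1, hk])]
      simp only [List.map_cons, List.sum_cons, hkd.2, Int.shiftLeft_eq, pow_succ]
      ring
    · rw [List.filter_cons, List.filter_cons, List.filter_cons,
        if_neg (by simp [hk]), if_neg (by simp [hk]), if_neg (by simp [hkd.1, hk])]

theorem alt_merge (c : Int) (t : List Int) :
    reduce_fraction_sum_alt (c :: c :: t) = reduce_fraction_sum_alt (c * 2 :: t) := by
  apply master
  · have hce : (0 = c) ↔ (0 = c * 2) := by omega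
    simp only [List.mem_cons]
    constructor
    · rintro (h | h | h)
      · exact Or.inl (hce.1 h)
      · exact Or.inl (hce.1 h)
      · exact Or.inr h
    · rintro (h | h)
      · exact Or.inl (hce.2 h)
      · exact Or.inr (Or.inr h)
  · exact pvW_merge c t

-- ---- B is the identity on strictly decreasing lists ----
theorem flatMap_filter_key_perm (key : Int → Int) (ks l' : List Int) (hnd : ks.Nodup)
    (hmem : ∀ x ∈ l', key x ∈ ks) :
    (ks.flatMap (fun m => l'.filter (fun x => key x == m))).Perm l' := by
  induction ks generalizing l' with
  | nil =>
    have hl : l' = [] := by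
      cases l' with
      | nil => rfl
      | cons a t => exact absurd (hmem a List.mem_cons_self) (by simp)
    simp [hl]
  | cons m ks ih =>
    obtain ⟨hm, hks⟩ := List.nodup_cons.1 hnd
    rw [List.flatMap_cons]
    have hcongr : ∀ m' ∈ ks, l'.filter (fun x => key x == m')
        = (l'.filter (fun x => !(key x == m))).filter (fun x => key x == m') := by
      intro m' hm'
      have hmm : m ≠ m' := fun h => hm (h ▸ hm')
      rw [List.filter_filter]
      apply List.filter_congr
      intro x _
      by_cases hx : key x = m'
      · simp [hx, Ne.symm hmm]
      · simp [hx]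
    rw [List.flatMap_congr hcongr]
    have h2 : ∀ x ∈ l'.filter (fun x => !(key x == m)), key x ∈ ks := by
      intro x hx
      obtain ⟨hxl, hxm⟩ := List.mem_filter.1 hx
      rcases List.mem_cons.1 (hmem x hxl) with h | h
      · exact absurd h (by simpa using hxm)
      · exact h
    refine (List.Perm.append_left _ (ih _ hks h2)).trans ?_
    exact List.filter_append_perm _ l'

theorem sum_shift_toNat (xs : List Int) :
    ((xs.map (fun x => (1 : Int) <<< pvLev x)).sum).toNat
      = ((xs.map (fun x => pvLev x)).map (fun k => 2 ^ k)).sum := by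
  induction xs with
  | nil => simp
  | cons x t ih =>
    simp only [List.map_cons, List.sum_cons]
    have h1 : (1 : Int) <<< pvLev x = ((2 ^ pvLev x : Nat) : Int) := by
      rw [Int.shiftLeft_eq, one_mul]; exact_mod_cast rfl
    have ht := sum_shift_nonneg t
    rw [h1]
    generalize (2 ^ pvLev x : Nat) = a
    omega

theorem alt_of_pairwise_gt (l : List Int) (h : l.Pairwise (· > ·)) :
    reduce_fraction_sum_alt l = l := by
  have hnd : l.Nodup := h.imp (fun hgt => ne_of_gt hgt)
  rw [alt_eq]
  apply PySem.List.sorted_rev_eq_of_perm_of_pairwise_gt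
  · have hstep1 : ∀ m ∈ (pvWeights l).keys,
        (pvExp m (pvW l m)).Perm ((pvNonzeros l).filter (fun x => pvKey x == m)) := by
      intro m hm
      set xsm := (pvNonzeros l).filter (fun x => pvKey x == m) with hxsm
      have hxf : ∀ x ∈ xsm, x ≠ 0 ∧ pvKey x = m := by
        intro x hx
        obtain ⟨h1, h2⟩ := List.mem_filter.1 hx
        exact ⟨by simpa using (List.mem_filter.1 h1).2, by simpa using h2⟩
      have hxsnd : xsm.Nodup := (hnd.filter _).filter _
      have hlev : (xsm.map (fun x => pvLev x)).Nodup := by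
        refine hxsnd.map_on ?_
        intro x hx y hy hxy
        obtain ⟨hx0, hxk⟩ := hxf x hx
        obtain ⟨hy0, hyk⟩ := hxf y hy
        have ex := (oddLoop_spec x hx0).2.2
        have ey := (oddLoop_spec y hy0).2.2
        rw [ex, ey, hxk, hyk, hxy]
      have htn : (pvW l m).toNat = ((xsm.map (fun x => pvLev x)).map (fun k => 2 ^ k)).sum := by
        unfold pvW
        rw [← hxsm]
        exact sum_shift_toNat xsm
      have hbits := pvBits_sum_perm _ _ hlev htn.symm
      unfold pvExp
      refine (hbits.map (fun i : Nat => m <<< i)).trans ?_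
      rw [List.map_map]
      have hid : ∀ x ∈ xsm, ((fun i : Nat => m <<< i) ∘ fun x => pvLev x) x = id x := by
        intro x hx
        obtain ⟨hx0, hxk⟩ := hxf x hx
        have ex := (oddLoop_spec x hx0).2.2
        simp only [Function.comp, id]
        rw [Int.shiftLeft_eq, ← hxk, ← ex]
      rw [List.map_congr_left hid, List.map_id]
    have hstep2 : ((pvWeights l).keys.flatMap (fun m => pvExp m (pvW l m))).Perm (pvNonzeros l) := by
      refine (List.Perm.flatMap_left _ hstep1).trans ?_
      apply flatMap_filter_key_perm pvKey _ _ (weights_keys_nodup l)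
      intro x hx
      rw [weights_keys, PySem.Set.mem_ofList]
      exact List.mem_map.2 ⟨x, hx, rfl⟩
    have hzeq : (if 0 ∈ l then ([0] : List Int) else []) = l.filter (fun x => x == 0) :=
      (filter_beq_of_nodup 0 l hnd).symm
    refine List.Perm.symm ?_
    refine (List.Perm.append_left _ hstep2).trans ?_
    rw [hzeq]
    unfold pvNonzeros
    exact List.filter_append_perm _ l
  · exact h

-- ---- A-side glue ----
theorem findPairAux_none_chain (s : List Int) (h : findPairAux s = none) :
    s.IsChain (· ≠ ·) := by
  induction s with
  | nil => simp
  | cons x t ih =>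
    cases t with
    | nil => simp
    | cons y u =>
      by_cases hxy : x = y
      · simp [findPairAux, hxy] at h
      · simp only [findPairAux, if_neg hxy, Option.map_eq_none_iff] at h
        exact List.isChain_cons_cons.2 ⟨hxy, ih h⟩

theorem pairwise_gt_of_ge_chain_ne (s : List Int)
    (hge : s.Pairwise (fun a b => b ≤ a)) (hne : s.IsChain (· ≠ ·)) :
    s.Pairwise (· > ·) := by
  induction s with
  | nil => simp
  | cons x t ih =>
    obtain ⟨hx, ht⟩ := List.pairwise_cons.1 hge
    have hrec := ih ht hne.tail
    rw [List.pairwise_cons]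
    refine ⟨?_, hrec⟩
    intro y hy
    cases t with
    | nil => simp at hy
    | cons z u =>
      have hxz : x ≠ z := (List.isChain_cons_cons.1 hne).1
      rcases List.mem_cons.1 hy with rfl | hyu
      · exact lt_of_le_of_ne (hx y List.mem_cons_self) (Ne.symm hxz)
      · have h1 : z ≤ x := hx z List.mem_cons_self
        have h2 : y < z := (List.pairwise_cons.1 hrec).1 y hyu
        exact lt_of_lt_of_le h2 h1

theorem A_eq_alt (l : List Int) : reduce_fraction_sum l = reduce_fraction_sum_alt l := by
  rw [reduce_fraction_sum]
  split
  · next h1 =>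
    cases l with
    | nil => simp at h1
    | cons a t =>
      cases t with
      | cons b u => simp at h1
      | nil => exact (alt_of_pairwise_gt [a] (by simp)).symm
  · next h1 =>
    dsimp only []
    split
    · next i c hfp =>
      obtain ⟨pre, suf, hs, hl⟩ := findPairAux_some_decomp _ i c hfp
      have hsl : PySem.List.slice (PySem.List.sorted l (fun x => x) true) none (some (i : Int)) = pre := by
        rw [PySem.List.slice_to_natCast, hs, ← hl, List.take_left]
      have hsr : PySem.List.slice (PySem.List.sorted l (fun x => x) true)
          (some ((i : Int) + 2)) none = suf := by
        rw [show ((i : Int) + 2) = (((i + 2 : Nat)) : Int) by push_cast; ring,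
          PySem.List.slice_from_natCast, hs,
          show pre ++ c :: c :: suf = (pre ++ [c, c]) ++ suf by simp,
          show i + 2 = (pre ++ [c, c]).length by simp [hl], List.drop_left]
      rw [hsl, hsr, A_eq_alt (pre ++ [c * 2] ++ suf)]
      have p1 : (pre ++ [c * 2] ++ suf).Perm (c * 2 :: (pre ++ suf)) := by
        rw [List.append_assoc]
        exact List.perm_middle
      have p2 : (c :: c :: (pre ++ suf)).Perm (pre ++ c :: c :: suf) :=
        (List.perm_middle.trans ((List.perm_middle).cons c)).symm
      calc reduce_fraction_sum_alt (pre ++ [c * 2] ++ suf)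
          = reduce_fraction_sum_alt (c * 2 :: (pre ++ suf)) := alt_perm _ _ p1
        _ = reduce_fraction_sum_alt (c :: c :: (pre ++ suf)) := (alt_merge c (pre ++ suf)).symm
        _ = reduce_fraction_sum_alt (pre ++ c :: c :: suf) := alt_perm _ _ p2
        _ = reduce_fraction_sum_alt l := by
            rw [← hs]
            exact alt_perm _ _ (PySem.List.sorted_perm l (fun x => x) true)
    · next hfp =>
      have hch := findPairAux_none_chain _ hfp
      have hge := PySem.List.sorted_pairwise_rev l (fun x => x)
      have hgt := pairwise_gt_of_ge_chain_ne _ hge hch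
      calc PySem.List.sorted l (fun x => x) true
          = reduce_fraction_sum_alt (PySem.List.sorted l (fun x => x) true) :=
            (alt_of_pairwise_gt _ hgt).symm
        _ = reduce_fraction_sum_alt l := alt_perm _ _ (PySem.List.sorted_perm l (fun x => x) true)
termination_by l.length
decreasing_by
  have hlen := congrArg List.length hs
  rw [PySem.List.length_sorted] at hlen
  simp at hlen ⊢
  omega

-- ===== VERDICT (by name: the statement is the Claim_ definition above) =====
theorem reduce_fraction_sum_spec : Claim_equal_reduce_fraction_sum :=
  fun fraction_list _ => A_eq_alt fraction_list
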